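-- pv_equiv track=rewrite | github.com/nastyh/LeetCode | Basic Data Structures/376_Wiggle_Subsequences.py | wiggleMaxLength_dp
-- ===== SOURCE A (Python) =====
-- def wiggleMaxLength_dp(nums):  # O(n^2) and O(n)
--     if not nums:
--         return 0
--     less = [1] * len(nums)
--     more = [1] * len(nums)
--     res_l = 1
--     res_m = 1
--     for i in range(1, len(nums)):
--         for j in range(i):
--             if nums[i] > nums[j] and more[i] < less[j] + 1:
--                 more[i] = less[j] + 1
--                 res_m = more[i]
--             elif nums[i] < nums[j] and less[i] < more[j] + 1:
--                 less[i] = more[j] + 1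
--                 res_l = less[i]
--     return max(res_l,res_m)
-- ===== SOURCE B (Python) =====
-- def wiggleMaxLength_dp(nums):  # linear greedy: one pass tracking up/down lengths
--     if not nums:
--         return 0
--     up = down = 1
--     prev = nums[0]
--     for x in nums[1:]:
--         if x > prev:
--             up = down + 1
--         elif x < prev:
--             down = up + 1
--         prev = x
--     return max(up, down)
-- ===== Notes on version B (the rewrite author's own statement) =====
-- stated objective: faster
-- what changed: replaced the quadratic per-pair DP over two length arrays by the one-pass greedy that keeps only the best up-ending and down-ending subsequence lengths
import Mathlib
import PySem

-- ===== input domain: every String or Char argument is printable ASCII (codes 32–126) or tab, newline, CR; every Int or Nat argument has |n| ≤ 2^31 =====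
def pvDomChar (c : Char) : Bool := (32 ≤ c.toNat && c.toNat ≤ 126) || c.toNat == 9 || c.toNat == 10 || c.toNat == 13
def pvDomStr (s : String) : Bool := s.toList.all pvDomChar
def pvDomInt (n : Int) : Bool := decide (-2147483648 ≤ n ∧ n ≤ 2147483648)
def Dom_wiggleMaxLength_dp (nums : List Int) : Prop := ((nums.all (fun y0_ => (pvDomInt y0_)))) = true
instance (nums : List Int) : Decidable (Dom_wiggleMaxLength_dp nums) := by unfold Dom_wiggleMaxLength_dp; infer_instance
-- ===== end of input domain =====

-- B replaces A's O(n^2) pairwise DP by the one-pass greedy (up/down counters); return values proved equal.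

-- ===== PORT A =====
-- inner-loop body: one step of `for j in range(i)` mutating (less, more, res_l, res_m)
def wmStateStep (nums : List Int) (i : Int)
    (st : List Int × List Int × Int × Int) (j : Int) :
    List Int × List Int × Int × Int :=
  let less := st.1; let more := st.2.1; let res_l := st.2.2.1; let res_m := st.2.2.2
  if PySem.List.pyGetD nums i 0 > PySem.List.pyGetD nums j 0 ∧
     PySem.List.pyGetD more i 0 < PySem.List.pyGetD less j 0 + 1 then
    -- more[i] = less[j] + 1 ; res_m = more[i]
    (less, PySem.List.pySetD more i (PySem.List.pyGetD less j 0 + 1), res_l,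
     PySem.List.pyGetD less j 0 + 1)
  else if PySem.List.pyGetD nums i 0 < PySem.List.pyGetD nums j 0 ∧
     PySem.List.pyGetD less i 0 < PySem.List.pyGetD more j 0 + 1 then
    -- less[i] = more[j] + 1 ; res_l = less[i]
    (PySem.List.pySetD less i (PySem.List.pyGetD more j 0 + 1), more,
     PySem.List.pyGetD more j 0 + 1, res_m)
  else st

-- `for j in range(i): …`
def wmInner (nums : List Int) (st : List Int × List Int × Int × Int) (i : Int) :
    List Int × List Int × Int × Int :=
  (PySem.List.pyRange 0 i 1).foldl (wmStateStep nums i) st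

def wiggleMaxLength_dp (nums : List Int) : Int :=
  if nums.isEmpty then 0
  else
    let st := (PySem.List.pyRange 1 (PySem.List.len nums) 1).foldl (wmInner nums)
      (List.replicate nums.length (1 : Int), List.replicate nums.length (1 : Int),
       (1 : Int), (1 : Int))
    max st.2.2.1 st.2.2.2

-- ===== PORT B =====
def wmGStep (s : Int × Int × Int) (x : Int) : Int × Int × Int :=
  if x > s.2.2 then (s.2.1 + 1, s.2.1, x)
  else if x < s.2.2 then (s.1, s.1 + 1, x)
  else (s.1, s.2.1, x)

def wiggleMaxLength_dp_alt (nums : List Int) : Int :=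
  match nums with
  | [] => 0
  | x :: xs =>
    let st := xs.foldl wmGStep (1, 1, x)
    max st.1 st.2.1

-- ===== PRECONDITION & SPEC =====
def Spec_wiggleMaxLength_dp (nums : List Int) (out : Int) : Prop := out = wiggleMaxLength_dp_alt nums
instance (nums : List Int) (out : Int) : Decidable (Spec_wiggleMaxLength_dp nums out) := by unfold Spec_wiggleMaxLength_dp; infer_instance

-- ===== CLAIM (what is proved, stated in full; the proofs are below) =====
def Claim_equal_wiggleMaxLength_dp : Prop := ∀ (nums : List Int), Dom_wiggleMaxLength_dp nums → Spec_wiggleMaxLength_dp nums (wiggleMaxLength_dp nums)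

-- ===== LEMMAS AND PROOFS =====

-- the loop invariant tying A's DP state after the outer iterations for i = 1..k-? (prefix of k
-- elements processed) to the greedy state (u, d, p)
def wmINV (nums : List Int) (k : Nat) (less more : List Int) (rl rm u d p : Int) : Prop :=
  less.length = nums.length ∧ more.length = nums.length ∧
  (∀ j : Nat, k ≤ j → j < nums.length → less.getD j 0 = 1 ∧ more.getD j 0 = 1) ∧
  p = nums.getD (k - 1) 0 ∧
  (∀ j < k, more.getD j 0 ≤ u) ∧ (∃ j < k, more.getD j 0 = u) ∧
  (∀ j < k, less.getD j 0 ≤ d) ∧ (∃ j < k, less.getD j 0 = d) ∧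
  (∃ j < k, less.getD j 0 = d ∧ nums.getD j 0 ≤ p) ∧
  (∃ j < k, more.getD j 0 = u ∧ p ≤ nums.getD j 0) ∧
  (d < u → ∃ j < k, less.getD j 0 = d ∧ nums.getD j 0 < p) ∧
  (u < d → ∃ j < k, more.getD j 0 = u ∧ p < nums.getD j 0) ∧
  (∀ j < k, p < nums.getD j 0 → more.getD j 0 ≤ d - 1) ∧
  (∀ j < k, nums.getD j 0 < p → less.getD j 0 ≤ u - 1) ∧
  1 ≤ u ∧ 1 ≤ d ∧ u ≤ d + 1 ∧ d ≤ u + 1 ∧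
  (∀ j < k, 1 ≤ less.getD j 0 ∧ 1 ≤ more.getD j 0) ∧
  rm ≤ u ∧ rl ≤ d ∧ (d < u → rm = u) ∧ (u < d → rl = d) ∧
  (u = d → u = 1 ∧ rm = 1 ∧ rl = 1)

theorem wm_getD_set_self {xs : List Int} {k : Nat} (h : k < xs.length) (v : Int) :
    (xs.set k v).getD k 0 = v := by
  simp [List.getD_eq_getElem?_getD, h]

theorem wm_getD_set_ne {xs : List Int} {k j : Nat} (h : j ≠ k) (v : Int) :
    (xs.set k v).getD j 0 = xs.getD j 0 := by
  simp [List.getD_eq_getElem?_getD, List.getElem?_set_ne (by omega : k ≠ j)]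

theorem wm_set_self {xs : List Int} {k : Nat} (h : k < xs.length) (hv : xs.getD k 0 = 1) :
    xs.set k 1 = xs := by
  rw [← hv, List.getD_eq_getElem _ _ h]
  exact List.set_getElem_self h

-- closed-form description of one full inner loop `for j in range(m)` at outer index k
theorem wm_inner_spec (nums less more : List Int) (rl rm : Int) (k : Nat)
    (hk : k < nums.length) (hl : less.length = nums.length) (hm : more.length = nums.length)
    (hlk : less.getD k 0 = 1) (hmk : more.getD k 0 = 1)
    (hpos : ∀ j < k, 1 ≤ less.getD j 0 ∧ 1 ≤ more.getD j 0) :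
    ∀ m : Nat, m ≤ k →
    ∃ L M rl' rm',
      (PySem.List.pyRange 0 (m : Int) 1).foldl (wmStateStep nums (k : Int)) (less, more, rl, rm)
        = (less.set k L, more.set k M, rl', rm')
      ∧ 1 ≤ M ∧ 1 ≤ L
      ∧ (∀ j < m, nums.getD j 0 < nums.getD k 0 → less.getD j 0 + 1 ≤ M)
      ∧ (M = 1 ∨ ∃ j < m, nums.getD j 0 < nums.getD k 0 ∧ M = less.getD j 0 + 1)
      ∧ rm' = (if M = 1 then rm else M)
      ∧ (∀ j < m, nums.getD k 0 < nums.getD j 0 → more.getD j 0 + 1 ≤ L)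
      ∧ (L = 1 ∨ ∃ j < m, nums.getD k 0 < nums.getD j 0 ∧ L = more.getD j 0 + 1)
      ∧ rl' = (if L = 1 then rl else L) := by
  have hkl : k < less.length := by omega
  have hkm : k < more.length := by omega
  intro m
  induction m with
  | zero =>
    intro _
    refine ⟨1, 1, rl, rm, ?_, le_refl 1, le_refl 1, by omega, Or.inl rfl, by simp,
      by omega, Or.inl rfl, by simp⟩
    rw [Nat.cast_zero, PySem.List.pyRange_one_eq_nil le_rfl, List.foldl_nil,
      wm_set_self hkl hlk, wm_set_self hkm hmk]
  | succ m ih =>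
    intro hm1
    obtain ⟨L, M, rl', rm', heq, hM1, hL1, hMub, hMw, hrm, hLub, hLw, hrl⟩ := ih (by omega)
    have hmk' : m ≠ k := by omega
    have hcast : ((m + 1 : Nat) : Int) = (m : Int) + 1 := by push_cast; ring
    rw [hcast, PySem.List.pyRange_one_succ_right (by omega : (0 : Int) ≤ (m : Int)),
      List.foldl_append, heq, List.foldl_cons, List.foldl_nil, wmStateStep]
    simp only [PySem.List.pyGetD_natCast, PySem.List.pySetD_natCast]
    rw [wm_getD_set_ne hmk', wm_getD_set_ne hmk',
      wm_getD_set_self (by simpa [hl] using hk : k < less.length),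
      wm_getD_set_self (by simpa [hm] using hk : k < more.length)]
    split_ifs with h1 h2
    · -- more[k] updated to less[m] + 1
      rw [List.set_set]
      refine ⟨L, less.getD m 0 + 1, rl', less.getD m 0 + 1, rfl,
        by have := (hpos m (by omega)).1; omega, hL1, ?_, ?_, ?_, ?_, ?_, hrl⟩
      · intro j hj hlt
        rcases Nat.lt_succ_iff_lt_or_eq.mp hj with hj' | rfl
        · have := hMub j hj' hlt; omega
        · omega
      · exact Or.inr ⟨m, by omega, h1.1, rfl⟩
      · have := (hpos m (by omega)).1
        rw [if_neg (by omega)]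
      · intro j hj hlt
        rcases Nat.lt_succ_iff_lt_or_eq.mp hj with hj' | rfl
        · exact hLub j hj' hlt
        · exact absurd hlt (by omega)
      · rcases hLw with h | ⟨j, hj, hc, he⟩
        · exact Or.inl h
        · exact Or.inr ⟨j, by omega, hc, he⟩
    · -- less[k] updated to more[m] + 1
      rw [List.set_set]
      refine ⟨more.getD m 0 + 1, M, more.getD m 0 + 1, rm', rfl,
        hM1, by have := (hpos m (by omega)).2; omega, ?_, ?_, hrm, ?_, ?_, ?_⟩
      · intro j hj hlt
        rcases Nat.lt_succ_iff_lt_or_eq.mp hj with hj' | rfl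
        · exact hMub j hj' hlt
        · exact absurd hlt (by omega)
      · rcases hMw with h | ⟨j, hj, hc, he⟩
        · exact Or.inl h
        · exact Or.inr ⟨j, by omega, hc, he⟩
      · intro j hj hlt
        rcases Nat.lt_succ_iff_lt_or_eq.mp hj with hj' | rfl
        · have := hLub j hj' hlt; omega
        · omega
      · exact Or.inr ⟨m, by omega, h2.1, rfl⟩
      · have := (hpos m (by omega)).2
        rw [if_neg (by omega)]
    · -- no update at j = m
      refine ⟨L, M, rl', rm', rfl, hM1, hL1, ?_, ?_, hrm, ?_, ?_, hrl⟩
      · intro j hj hlt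
        rcases Nat.lt_succ_iff_lt_or_eq.mp hj with hj' | rfl
        · exact hMub j hj' hlt
        · omega
      · rcases hMw with h | ⟨j, hj, hc, he⟩
        · exact Or.inl h
        · exact Or.inr ⟨j, by omega, hc, he⟩
      · intro j hj hlt
        rcases Nat.lt_succ_iff_lt_or_eq.mp hj with hj' | rfl
        · exact hLub j hj' hlt
        · omega
      · rcases hLw with h | ⟨j, hj, hc, he⟩
        · exact Or.inl h
        · exact Or.inr ⟨j, by omega, hc, he⟩

-- one outer step preserves the invariant and matches one greedy step
theorem wm_outer_step (nums less more : List Int) (rl rm u d p : Int) (k : Nat)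
    (hk1 : 1 ≤ k) (hk : k < nums.length)
    (hinv : wmINV nums k less more rl rm u d p) :
    ∃ less' more' rl' rm',
      wmInner nums (less, more, rl, rm) (k : Int) = (less', more', rl', rm') ∧
      wmINV nums (k + 1) less' more' rl' rm'
        (wmGStep (u, d, p) (nums.getD k 0)).1
        (wmGStep (u, d, p) (nums.getD k 0)).2.1
        (wmGStep (u, d, p) (nums.getD k 0)).2.2 := by
  obtain ⟨hl, hm, hun, hp, hmu, hmuw, hld, hldw, hwd, hwu, hsd, hsu, hcapm, hcapl,
    hu1, hd1, hud, hdu, hpos, hrmu, hrld, hrmE, hrlE, heq1⟩ := hinv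
  have hkl : k < less.length := by omega
  have hkm : k < more.length := by omega
  obtain ⟨L, M, rl', rm', heq, hM1, hL1, hMub, hMw, hrm', hLub, hLw, hrl'⟩ :=
    wm_inner_spec nums less more rl rm k hk hl hm (hun k le_rfl hk).1 (hun k le_rfl hk).2
      hpos k le_rfl
  refine ⟨less.set k L, more.set k M, rl', rm', heq, ?_⟩
  have hslk : (less.set k L).getD k 0 = L := wm_getD_set_self hkl L
  have hsmk : (more.set k M).getD k 0 = M := wm_getD_set_self hkm M
  have hsl : ∀ j : Nat, j < k → (less.set k L).getD j 0 = less.getD j 0 :=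
    fun j h => wm_getD_set_ne (by omega) L
  have hsm : ∀ j : Nat, j < k → (more.set k M).getD j 0 = more.getD j 0 :=
    fun j h => wm_getD_set_ne (by omega) M
  rcases lt_trichotomy p (nums.getD k 0) with hc | hc | hc
  · -- rising step: up = down + 1
    have hg : wmGStep (u, d, p) (nums.getD k 0) = (d + 1, d, nums.getD k 0) := by
      unfold wmGStep; dsimp only; rw [if_pos (by omega)]
    rw [hg]
    dsimp only
    obtain ⟨j0, hj0, hj0d, hj0le⟩ := hwd
    have hMeq : M = d + 1 := by
      have h1 := hMub j0 hj0 (by omega)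
      rcases hMw with h | ⟨j, hj, _, he⟩
      · omega
      · have := hld j hj; omega
    have hLle : L ≤ d := by
      rcases hLw with h | ⟨j, hj, hcj, he⟩
      · omega
      · have := hcapm j hj (by omega); omega
    refine ⟨by simp [hl], by simp [hm], ?_, by simp, ?_,
      ⟨k, by omega, by rw [hsmk, hMeq]⟩,
      ?_, ?_, ?_, ⟨k, by omega, by rw [hsmk, hMeq], le_refl _⟩, ?_,
      by intro h; exact absurd h (by omega), ?_, ?_,
      by omega, by omega, by omega, by omega, ?_, ?_, ?_, ?_,
      by intro h; exact absurd h (by omega), by intro h; exact absurd h (by omega)⟩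
    · intro j h1 h2
      rw [wm_getD_set_ne (by omega) L, wm_getD_set_ne (by omega) M]
      exact hun j (by omega) h2
    · intro j hj
      rcases Nat.lt_succ_iff_lt_or_eq.mp hj with hj' | rfl
      · rw [hsm j hj']; have := hmu j hj'; omega
      · omega
    · intro j hj
      rcases Nat.lt_succ_iff_lt_or_eq.mp hj with hj' | rfl
      · rw [hsl j hj']; exact hld j hj'
      · omega
    · obtain ⟨j, hj, he⟩ := hldw
      exact ⟨j, by omega, by rw [hsl j hj]; exact he⟩
    · exact ⟨j0, by omega, by rw [hsl j0 hj0]; exact hj0d, by omega⟩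
    · intro _
      exact ⟨j0, by omega, by rw [hsl j0 hj0]; exact hj0d, by omega⟩
    · intro j hj hgt
      rcases Nat.lt_succ_iff_lt_or_eq.mp hj with hj' | rfl
      · rw [hsm j hj']; exact hcapm j hj' (by omega)
      · omega
    · intro j hj hlt
      rcases Nat.lt_succ_iff_lt_or_eq.mp hj with hj' | rfl
      · rw [hsl j hj']; have := hld j hj'; omega
      · omega
    · intro j hj
      rcases Nat.lt_succ_iff_lt_or_eq.mp hj with hj' | rfl
      · rw [hsl j hj', hsm j hj']; exact hpos j hj'
      · constructor <;> omega
    · rw [hrm', if_neg (by omega)]; omega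
    · rw [hrl']; split_ifs <;> omega
    · intro _; rw [hrm', if_neg (by omega)]; omega
  · -- flat step: state unchanged
    have hg : wmGStep (u, d, p) (nums.getD k 0) = (u, d, nums.getD k 0) := by
      unfold wmGStep; dsimp only; rw [if_neg (by omega), if_neg (by omega)]
    rw [hg]
    dsimp only
    have hMle : M ≤ u := by
      rcases hMw with h | ⟨j, hj, hcj, he⟩
      · omega
      · have := hcapl j hj (by omega); omega
    have hLle : L ≤ d := by
      rcases hLw with h | ⟨j, hj, hcj, he⟩
      · omega
      · have := hcapm j hj (by omega); omega
    refine ⟨by simp [hl], by simp [hm], ?_, by simp, ?_, ?_, ?_, ?_, ?_, ?_,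
      ?_, ?_, ?_, ?_, by omega, by omega, by omega, by omega, ?_, ?_, ?_, ?_, ?_, ?_⟩
    · intro j h1 h2
      rw [wm_getD_set_ne (by omega) L, wm_getD_set_ne (by omega) M]
      exact hun j (by omega) h2
    · intro j hj
      rcases Nat.lt_succ_iff_lt_or_eq.mp hj with hj' | rfl
      · rw [hsm j hj']; exact hmu j hj'
      · omega
    · obtain ⟨j, hj, he⟩ := hmuw
      exact ⟨j, by omega, by rw [hsm j hj]; exact he⟩
    · intro j hj
      rcases Nat.lt_succ_iff_lt_or_eq.mp hj with hj' | rfl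
      · rw [hsl j hj']; exact hld j hj'
      · omega
    · obtain ⟨j, hj, he⟩ := hldw
      exact ⟨j, by omega, by rw [hsl j hj]; exact he⟩
    · obtain ⟨j, hj, he, hle⟩ := hwd
      exact ⟨j, by omega, by rw [hsl j hj]; exact he, by omega⟩
    · obtain ⟨j, hj, he, hle⟩ := hwu
      exact ⟨j, by omega, by rw [hsm j hj]; exact he, by omega⟩
    · intro hdu'
      obtain ⟨j, hj, he, hlt⟩ := hsd hdu'
      exact ⟨j, by omega, by rw [hsl j hj]; exact he, by omega⟩
    · intro hud'
      obtain ⟨j, hj, he, hlt⟩ := hsu hud'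
      exact ⟨j, by omega, by rw [hsm j hj]; exact he, by omega⟩
    · intro j hj hgt
      rcases Nat.lt_succ_iff_lt_or_eq.mp hj with hj' | rfl
      · rw [hsm j hj']; exact hcapm j hj' (by omega)
      · omega
    · intro j hj hlt
      rcases Nat.lt_succ_iff_lt_or_eq.mp hj with hj' | rfl
      · rw [hsl j hj']; exact hcapl j hj' (by omega)
      · omega
    · intro j hj
      rcases Nat.lt_succ_iff_lt_or_eq.mp hj with hj' | rfl
      · rw [hsl j hj', hsm j hj']; exact hpos j hj'
      · constructor <;> omega
    · rw [hrm']; split_ifs <;> omega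
    · rw [hrl']; split_ifs <;> omega
    · intro hdu'
      have hMu : M = 1 ∨ M = u := by
        rcases hMw with h | ⟨j, hj, hcj, he⟩
        · exact Or.inl h
        · obtain ⟨j1, hj1, he1, hlt1⟩ := hsd hdu'
          have := hMub j1 hj1 (by omega)
          right; omega
      rw [hrm']
      rcases hMu with h | h
      · rw [if_pos h]; exact hrmE hdu'
      · split_ifs <;> omega
    · intro hud'
      have hLd : L = 1 ∨ L = d := by
        rcases hLw with h | ⟨j, hj, hcj, he⟩
        · exact Or.inl h
        · obtain ⟨j1, hj1, he1, hlt1⟩ := hsu hud'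
          have := hLub j1 hj1 (by omega)
          right; omega
      rw [hrl']
      rcases hLd with h | h
      · rw [if_pos h]; exact hrlE hud'
      · split_ifs <;> omega
    · intro hueq
      obtain ⟨hu1', hrm1, hrl1⟩ := heq1 hueq
      have hM : M = 1 := by
        rcases hMw with h | ⟨j, hj, hcj, he⟩
        · exact h
        · have := hcapl j hj (by omega)
          have := (hpos j hj).1; omega
      have hL : L = 1 := by
        rcases hLw with h | ⟨j, hj, hcj, he⟩
        · exact h
        · have := hcapm j hj (by omega)
          have := (hpos j hj).2; omega
      rw [hrm', hrl', if_pos hM, if_pos hL]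
      exact ⟨hu1', hrm1, hrl1⟩
  · -- falling step: down = up + 1
    have hg : wmGStep (u, d, p) (nums.getD k 0) = (u, u + 1, nums.getD k 0) := by
      unfold wmGStep
      dsimp only
      rw [if_neg (by omega), if_pos (by omega)]
    rw [hg]
    dsimp only
    obtain ⟨j0, hj0, hj0u, hj0ge⟩ := hwu
    have hLeq : L = u + 1 := by
      have h1 := hLub j0 hj0 (by omega)
      rcases hLw with h | ⟨j, hj, _, he⟩
      · omega
      · have := hmu j hj; omega
    have hMle : M ≤ u := by
      rcases hMw with h | ⟨j, hj, hcj, he⟩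
      · omega
      · have := hcapl j hj (by omega); omega
    refine ⟨by simp [hl], by simp [hm], ?_, by simp, ?_, ?_, ?_,
      ⟨k, by omega, by rw [hslk, hLeq]⟩,
      ⟨k, by omega, by rw [hslk, hLeq], le_refl _⟩, ?_,
      by intro h; exact absurd h (by omega), ?_, ?_, ?_,
      by omega, by omega, by omega, by omega, ?_, ?_, ?_,
      by intro h; exact absurd h (by omega), ?_,
      by intro h; exact absurd h (by omega)⟩
    · intro j h1 h2
      rw [wm_getD_set_ne (by omega) L, wm_getD_set_ne (by omega) M]
      exact hun j (by omega) h2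
    · intro j hj
      rcases Nat.lt_succ_iff_lt_or_eq.mp hj with hj' | rfl
      · rw [hsm j hj']; exact hmu j hj'
      · omega
    · obtain ⟨j, hj, he⟩ := hmuw
      exact ⟨j, by omega, by rw [hsm j hj]; exact he⟩
    · intro j hj
      rcases Nat.lt_succ_iff_lt_or_eq.mp hj with hj' | rfl
      · rw [hsl j hj']; have := hld j hj'; omega
      · omega
    · exact ⟨j0, by omega, by rw [hsm j0 hj0]; exact hj0u, by omega⟩
    · intro _
      exact ⟨j0, by omega, by rw [hsm j0 hj0]; exact hj0u, by omega⟩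
    · intro j hj hgt
      rcases Nat.lt_succ_iff_lt_or_eq.mp hj with hj' | rfl
      · rw [hsm j hj']; have := hmu j hj'; omega
      · omega
    · intro j hj hlt
      rcases Nat.lt_succ_iff_lt_or_eq.mp hj with hj' | rfl
      · rw [hsl j hj']; exact hcapl j hj' (by omega)
      · omega
    · intro j hj
      rcases Nat.lt_succ_iff_lt_or_eq.mp hj with hj' | rfl
      · rw [hsl j hj', hsm j hj']; exact hpos j hj'
      · constructor <;> omega
    · rw [hrm']; split_ifs <;> omega
    · rw [hrl', if_neg (by omega)]; omega
    · intro _; rw [hrl', if_neg (by omega)]; omega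

-- the outer loop up to outer index k, run against the greedy fold over the same prefix
theorem wm_main (x : Int) (xs : List Int) :
    ∀ k : Nat, 1 ≤ k → k ≤ (x :: xs).length →
    ∃ less more rl rm,
      (PySem.List.pyRange 1 (k : Int) 1).foldl (wmInner (x :: xs))
        (List.replicate (x :: xs).length (1 : Int), List.replicate (x :: xs).length (1 : Int),
         (1 : Int), (1 : Int)) = (less, more, rl, rm) ∧
      wmINV (x :: xs) k less more rl rm
        ((xs.take (k - 1)).foldl wmGStep (1, 1, x)).1
        ((xs.take (k - 1)).foldl wmGStep (1, 1, x)).2.1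
        ((xs.take (k - 1)).foldl wmGStep (1, 1, x)).2.2 := by
  intro k
  induction k with
  | zero => intro h; omega
  | succ k ih =>
    intro _ hk1
    rcases Nat.eq_zero_or_pos k with rfl | hkpos
    · -- base: k = 1, nothing processed yet
      rw [Nat.cast_one, PySem.List.pyRange_one_eq_nil le_rfl, List.foldl_nil]
      refine ⟨_, _, _, _, rfl, ?_⟩
      show wmINV (x :: xs) (0 + 1) (List.replicate (x :: xs).length 1)
        (List.replicate (x :: xs).length 1) 1 1 1 1 x
      have hrep : ∀ j : Nat, j < (x :: xs).length →
          (List.replicate (x :: xs).length (1 : Int)).getD j 0 = 1 := by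
        intro j hj
        rw [List.getD_eq_getElem _ _ (by simpa using hj)]
        simp
      have h0 : (0 : Nat) < (x :: xs).length := by simp
      refine ⟨by simp, by simp, fun j _ hj => ⟨hrep j hj, hrep j hj⟩, by simp,
        ?_, ⟨0, by omega, hrep 0 h0⟩, ?_, ⟨0, by omega, hrep 0 h0⟩,
        ⟨0, by omega, hrep 0 h0, by simp⟩, ⟨0, by omega, hrep 0 h0, by simp⟩,
        by intro h; exact absurd h (by omega), by intro h; exact absurd h (by omega),
        ?_, ?_, le_refl _, le_refl _, by omega, by omega, ?_,
        le_refl _, le_refl _, by intro h; exact absurd h (by omega),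
        by intro h; exact absurd h (by omega), fun _ => ⟨rfl, rfl, rfl⟩⟩
      · intro j hj
        interval_cases j
        exact le_of_eq (hrep 0 h0)
      · intro j hj
        interval_cases j
        exact le_of_eq (hrep 0 h0)
      · intro j hj hlt
        interval_cases j
        rw [List.getD_cons_zero] at hlt
        omega
      · intro j hj hlt
        interval_cases j
        rw [List.getD_cons_zero] at hlt
        omega
      · intro j hj
        interval_cases j
        exact ⟨le_of_eq (hrep 0 h0).symm, le_of_eq (hrep 0 h0).symm⟩
    · -- step: run one more outer iteration
      obtain ⟨less, more, rl, rm, heq, hinv⟩ := ih hkpos (by omega)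
      have hcast : ((k + 1 : Nat) : Int) = (k : Int) + 1 := by push_cast; ring
      rw [hcast, PySem.List.pyRange_one_succ_right (by omega : (1 : Int) ≤ (k : Int)),
        List.foldl_append, heq, List.foldl_cons, List.foldl_nil]
      obtain ⟨less', more', rl', rm', heq', hinv'⟩ :=
        wm_outer_step (x :: xs) less more rl rm _ _ _ k hkpos (by simpa using hk1) hinv
      refine ⟨less', more', rl', rm', heq', ?_⟩
      obtain ⟨m, rfl⟩ : ∃ m, k = m + 1 := ⟨k - 1, by omega⟩
      have hkx : m < xs.length := by simp at hk1; omega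
      have htake : xs.take (m + 1) = xs.take m ++ [xs[m]] := by
        rw [List.take_add_one, List.getElem?_eq_getElem hkx]
        simp
      have hnum : (x :: xs).getD (m + 1) 0 = xs[m] := by
        rw [List.getD_cons_succ]
        exact List.getD_eq_getElem xs 0 hkx
      have hG : (xs.take (m + 1)).foldl wmGStep (1, 1, x)
          = wmGStep ((xs.take m).foldl wmGStep (1, 1, x)) ((x :: xs).getD (m + 1) 0) := by
        rw [htake, List.foldl_append, hnum]
        simp
      simp only [Nat.add_sub_cancel] at hinv' ⊢
      rw [hG]
      exact hinv'

-- ===== VERDICT (by name: the statement is the Claim_ definition above) =====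
theorem wiggleMaxLength_dp_spec : Claim_equal_wiggleMaxLength_dp := by
  unfold Claim_equal_wiggleMaxLength_dp Spec_wiggleMaxLength_dp
  intro nums _
  cases nums with
  | nil => rfl
  | cons x xs =>
    obtain ⟨less, more, rl, rm, heq, hinv⟩ :=
      wm_main x xs (x :: xs).length (by simp) le_rfl
    have hA : wiggleMaxLength_dp (x :: xs) = max rl rm := by
      unfold wiggleMaxLength_dp
      rw [if_neg (by simp)]
      simp only [PySem.List.len_eq, heq]
    have htake : xs.take ((x :: xs).length - 1) = xs := by simp
    rw [htake] at hinv
    have hB : wiggleMaxLength_dp_alt (x :: xs)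
        = max (xs.foldl wmGStep (1, 1, x)).1 (xs.foldl wmGStep (1, 1, x)).2.1 := rfl
    obtain ⟨-, -, -, -, -, -, -, -, -, -, -, -, -, -, hu1, hd1, hud, hdu, -,
      hrmu, hrld, hrmE, hrlE, heq1⟩ := hinv
    rw [hA, hB]
    rcases lt_trichotomy (xs.foldl wmGStep (1, 1, x)).1 (xs.foldl wmGStep (1, 1, x)).2.1
      with hc | hc | hc
    · have := hrlE hc; omega
    · obtain ⟨h1, h2, h3⟩ := heq1 hc; omega
    · have := hrmE hc; omega
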